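-- pv_equiv track=rewrite | github.com/taylor-swift-13/ACProver | src/experience_extract.py | _oracle_fix_strategy
-- ===== SOURCE A (Python) =====
-- from typing import Any, Dict, List, Optional
--
-- def infer_proof_shape_tags(text: str) -> List[str]:
--     lowered = text.lower()
--     tags: List[str] = []
--     if "induction" in lowered or "elim" in lowered:
--         tags.append("induction")
--     if "rewrite" in lowered:
--         tags.append("rewrite")
--     if "transitivity" in lowered:
--         tags.append("transitivity")
--     if "contradiction" in lowered or "exfalso" in lowered:
--         tags.append("contradiction")
--     if "assert " in lowered or "\nhave " in lowered or "\nlemma " in lowered: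
--         tags.append("local_lemma")
--     if "auto" in lowered or "eauto" in lowered:
--         tags.append("automation")
--     if "destruct" in lowered or "case" in lowered:
--         tags.append("case_analysis")
--     if "apply " in lowered:
--         tags.append("apply_chain")
--     return sorted(set(tags))
--
-- def _oracle_fix_strategy(failed_proof: str, oracle_proof: str) -> str:
--     oracle_tags = infer_proof_shape_tags(oracle_proof)
--     if oracle_tags:
--         return "Modify the attempt so it follows the oracle proof shape: " + ", ".join(oracle_tags) + "."
--     if oracle_proof.strip():
--         compact = " ".join(line.strip() for line in oracle_proof.splitlines() if line.strip())
--         return f"Replace the failed script with the proof structure from `oracle_proof.v`, starting with: `{compact[:180]}`."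
--     return "No oracle proof was available for a concrete fix."
-- ===== SOURCE B (Python) =====
-- _KW_TAGS = [
--     ("induction", "induction"),
--     ("elim", "induction"),
--     ("rewrite", "rewrite"),
--     ("transitivity", "transitivity"),
--     ("contradiction", "contradiction"),
--     ("exfalso", "contradiction"),
--     ("assert ", "local_lemma"),
--     ("\nhave ", "local_lemma"),
--     ("\nlemma ", "local_lemma"),
--     ("auto", "automation"),
--     ("eauto", "automation"),
--     ("destruct", "case_analysis"),
--     ("case", "case_analysis"),
--     ("apply ", "apply_chain"),
-- ]
--
--
-- def _oracle_fix_strategy(failed_proof: str, oracle_proof: str) -> str: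
--     # Text-driven single pass: at each position of the lowered text, record the
--     # tag of every keyword that starts there, instead of one substring search
--     # per keyword.
--     lowered = oracle_proof.lower()
--     found = set()
--     for i in range(len(lowered) + 1):
--         for kw, tag in _KW_TAGS:
--             if lowered.startswith(kw, i):
--                 found.add(tag)
--     if found:
--         return "Modify the attempt so it follows the oracle proof shape: " + ", ".join(sorted(found)) + "."
--     if oracle_proof.strip():
--         compact = " ".join(line.strip() for line in oracle_proof.splitlines() if line.strip())
--         return f"Replace the failed script with the proof structure from `oracle_proof.v`, starting with: `{compact[:180]}`."
--     return "No oracle proof was available for a concrete fix."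
-- ===== Notes on version B (the rewrite author's own statement) =====
-- stated objective: alternative
-- what changed: Tag inference is inverted from keyword-driven to text-driven: instead of one substring-membership search per keyword, B makes a single left-to-right pass over the lowered text and, at each position, records the tag of every keyword that starts there (startswith at offset), collecting tags in a set that is sorted at the end.
import Mathlib
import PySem

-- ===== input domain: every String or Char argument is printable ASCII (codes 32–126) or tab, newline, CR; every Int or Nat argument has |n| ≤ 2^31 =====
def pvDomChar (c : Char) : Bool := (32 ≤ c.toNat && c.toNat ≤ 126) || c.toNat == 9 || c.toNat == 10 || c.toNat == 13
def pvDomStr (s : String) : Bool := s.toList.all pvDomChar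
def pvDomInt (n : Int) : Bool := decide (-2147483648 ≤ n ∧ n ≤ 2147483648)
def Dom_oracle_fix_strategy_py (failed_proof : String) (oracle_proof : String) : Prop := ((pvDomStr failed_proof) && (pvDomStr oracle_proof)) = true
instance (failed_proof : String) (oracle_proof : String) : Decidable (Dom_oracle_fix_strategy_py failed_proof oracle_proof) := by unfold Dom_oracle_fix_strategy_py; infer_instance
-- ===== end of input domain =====

-- B inverts A's tag inference: instead of one substring search per keyword, it makes a
-- single pass over the positions of the lowered text, recording the tag of every keyword
-- that starts at each position, then sorts the collected set (objective: alternative).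

-- ===== PORT A =====
def infer_proof_shape_tags_py (text : String) : List String :=
  let lowered := PySem.Str.lower text
  let tags : List String := []
  let tags := if PySem.Str.isIn "induction" lowered || PySem.Str.isIn "elim" lowered then tags ++ ["induction"] else tags
  let tags := if PySem.Str.isIn "rewrite" lowered then tags ++ ["rewrite"] else tags
  let tags := if PySem.Str.isIn "transitivity" lowered then tags ++ ["transitivity"] else tags
  let tags := if PySem.Str.isIn "contradiction" lowered || PySem.Str.isIn "exfalso" lowered then tags ++ ["contradiction"] else tags
  let tags := if PySem.Str.isIn "assert " lowered || PySem.Str.isIn "\nhave " lowered || PySem.Str.isIn "\nlemma " lowered then tags ++ ["local_lemma"] else tags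
  let tags := if PySem.Str.isIn "auto" lowered || PySem.Str.isIn "eauto" lowered then tags ++ ["automation"] else tags
  let tags := if PySem.Str.isIn "destruct" lowered || PySem.Str.isIn "case" lowered then tags ++ ["case_analysis"] else tags
  let tags := if PySem.Str.isIn "apply " lowered then tags ++ ["apply_chain"] else tags
  PySem.List.sorted (PySem.Set.ofList tags) (fun x => x) false

def oracle_fix_strategy_py (failed_proof : String) (oracle_proof : String) : String :=
  let oracle_tags := infer_proof_shape_tags_py oracle_proof
  if oracle_tags ≠ [] then
    "Modify the attempt so it follows the oracle proof shape: " ++ PySem.Str.join ", " oracle_tags ++ "."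
  else if PySem.Str.strip oracle_proof ≠ "" then
    let compact := PySem.Str.join " " (((PySem.Str.splitlines oracle_proof).map PySem.Str.strip).filter (fun l => l ≠ ""))
    "Replace the failed script with the proof structure from `oracle_proof.v`, starting with: `" ++ PySem.Str.slice compact none (some 180) ++ "`."
  else
    "No oracle proof was available for a concrete fix."

-- ===== PORT B =====
def pvKwTags : List (List Char × String) :=
  [("induction".toList, "induction"), ("elim".toList, "induction"),
   ("rewrite".toList, "rewrite"),
   ("transitivity".toList, "transitivity"),
   ("contradiction".toList, "contradiction"), ("exfalso".toList, "contradiction"),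
   ("assert ".toList, "local_lemma"), ("\nhave ".toList, "local_lemma"), ("\nlemma ".toList, "local_lemma"),
   ("auto".toList, "automation"), ("eauto".toList, "automation"),
   ("destruct".toList, "case_analysis"), ("case".toList, "case_analysis"),
   ("apply ".toList, "apply_chain")]

-- the position scan of Source B: for i in range(len(lowered)+1): for kw, tag in _KW_TAGS: if lowered.startswith(kw, i): found.add(tag)
def pvScan (lowered : List Char) : PySem.Set String :=
  (List.range (lowered.length + 1)).foldl
    (fun s i =>
      pvKwTags.foldl
        (fun s r => if PySem.Chars.startswith (lowered.drop i) r.1 then PySem.Set.add s r.2 else s) s)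
    PySem.Set.empty

def oracle_fix_strategy_py_alt (failed_proof : String) (oracle_proof : String) : String :=
  let lowered := (PySem.Str.lower oracle_proof).toList
  let found := pvScan lowered
  if found ≠ [] then
    "Modify the attempt so it follows the oracle proof shape: " ++
      PySem.Str.join ", " (PySem.List.sorted found (fun x => x) false) ++ "."
  else if PySem.Str.strip oracle_proof ≠ "" then
    let compact := PySem.Str.join " " (((PySem.Str.splitlines oracle_proof).map PySem.Str.strip).filter (fun l => l ≠ ""))
    "Replace the failed script with the proof structure from `oracle_proof.v`, starting with: `" ++ PySem.Str.slice compact none (some 180) ++ "`."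
  else
    "No oracle proof was available for a concrete fix."

-- ===== PRECONDITION & SPEC =====
def Spec_oracle_fix_strategy_py (failed_proof : String) (oracle_proof : String) (out : String) : Prop := out = oracle_fix_strategy_py_alt failed_proof oracle_proof
instance (failed_proof : String) (oracle_proof : String) (out : String) : Decidable (Spec_oracle_fix_strategy_py failed_proof oracle_proof out) := by unfold Spec_oracle_fix_strategy_py; infer_instance

-- ===== CLAIM =====
def Claim_equal_oracle_fix_strategy_py : Prop := ∀ (failed_proof : String) (oracle_proof : String), Dom_oracle_fix_strategy_py failed_proof oracle_proof → Spec_oracle_fix_strategy_py failed_proof oracle_proof (oracle_fix_strategy_py failed_proof oracle_proof)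

-- ===== LEMMAS AND PROOFS =====

-- alphabetically ordered concatenation of the eight optional tags
def pvIfTags (c1 c2 c3 c4 c5 c6 c7 c8 : Bool) : List String :=
  (if c8 then ["apply_chain"] else []) ++ (if c6 then ["automation"] else [])
    ++ (if c7 then ["case_analysis"] else []) ++ (if c4 then ["contradiction"] else [])
    ++ (if c1 then ["induction"] else []) ++ (if c5 then ["local_lemma"] else [])
    ++ (if c2 then ["rewrite"] else []) ++ (if c3 then ["transitivity"] else [])

def pvAllSorted : List String :=
  ["apply_chain","automation","case_analysis","contradiction","induction","local_lemma","rewrite","transitivity"]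

lemma pvPW : pvAllSorted.Pairwise (· < ·) := by simp [pvAllSorted]; decide

-- A's ordered-then-sorted tag list equals the alphabetical if-concatenation,
-- for arbitrary truth values of the eight combined conditions.
lemma pvTags_core (c1 c2 c3 c4 c5 c6 c7 c8 : Bool) :
    PySem.List.sorted (PySem.Set.ofList
      (let tags : List String := []
       let tags := if c1 then tags ++ ["induction"] else tags
       let tags := if c2 then tags ++ ["rewrite"] else tags
       let tags := if c3 then tags ++ ["transitivity"] else tags
       let tags := if c4 then tags ++ ["contradiction"] else tags
       let tags := if c5 then tags ++ ["local_lemma"] else tags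
       let tags := if c6 then tags ++ ["automation"] else tags
       let tags := if c7 then tags ++ ["case_analysis"] else tags
       let tags := if c8 then tags ++ ["apply_chain"] else tags
       tags)) (fun x => x) false = pvIfTags c1 c2 c3 c4 c5 c6 c7 c8 := by
  unfold pvIfTags
  cases c1 <;> cases c2 <;> cases c3 <;> cases c4 <;> cases c5 <;> cases c6 <;> cases c7 <;> cases c8 <;>
    (refine PySem.List.sorted_id_eq_of_perm_of_pairwise _ _ ?_
      ((List.Pairwise.sublist ?_ pvPW).imp (fun h => le_of_lt h)) <;> decide)

lemma pvNodupIfTags (c1 c2 c3 c4 c5 c6 c7 c8 : Bool) :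
    (pvIfTags c1 c2 c3 c4 c5 c6 c7 c8).Nodup := by
  unfold pvIfTags
  cases c1 <;> cases c2 <;> cases c3 <;> cases c4 <;> cases c5 <;> cases c6 <;> cases c7 <;> cases c8 <;> decide

lemma pvPWIfTags (c1 c2 c3 c4 c5 c6 c7 c8 : Bool) :
    (pvIfTags c1 c2 c3 c4 c5 c6 c7 c8).Pairwise (· < ·) := by
  unfold pvIfTags
  cases c1 <;> cases c2 <;> cases c3 <;> cases c4 <;> cases c5 <;> cases c6 <;> cases c7 <;> cases c8 <;>
    exact List.Pairwise.sublist (by decide) pvPW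

lemma pvMemIte (t x : String) (c : Bool) : t ∈ (if c then [x] else ([] : List String)) ↔ c = true ∧ t = x := by
  cases c <;> simp

lemma pvMemIfTags (c1 c2 c3 c4 c5 c6 c7 c8 : Bool) (t : String) :
    t ∈ pvIfTags c1 c2 c3 c4 c5 c6 c7 c8 ↔
      (c8 = true ∧ t = "apply_chain") ∨ (c6 = true ∧ t = "automation")
      ∨ (c7 = true ∧ t = "case_analysis") ∨ (c4 = true ∧ t = "contradiction")
      ∨ (c1 = true ∧ t = "induction") ∨ (c5 = true ∧ t = "local_lemma")
      ∨ (c2 = true ∧ t = "rewrite") ∨ (c3 = true ∧ t = "transitivity") := by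
  simp only [pvIfTags, List.mem_append, pvMemIte, or_assoc]

-- membership in the inner (per-position) fold
lemma pvMemInner (rules : List (List Char × String)) (q : List Char × String → Bool)
    (s : PySem.Set String) (t : String) :
    t ∈ rules.foldl (fun s r => if q r then PySem.Set.add s r.2 else s) s
      ↔ t ∈ s ∨ ∃ r ∈ rules, q r = true ∧ t = r.2 := by
  induction rules generalizing s with
  | nil => simp
  | cons r rs ih =>
    by_cases h : q r
    · simp only [List.foldl_cons, h, if_true, ih, PySem.Set.mem_add, List.mem_cons]
      constructor
      · rintro ((hs | he) | hr)
        · exact Or.inl hs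
        · exact Or.inr ⟨r, Or.inl rfl, h, he⟩
        · obtain ⟨r', hr', hq, ht⟩ := hr; exact Or.inr ⟨r', Or.inr hr', hq, ht⟩
      · rintro (hs | ⟨r', hr', hq, ht⟩)
        · exact Or.inl (Or.inl hs)
        · rcases hr' with rfl | hr'
          · exact Or.inl (Or.inr ht)
          · exact Or.inr ⟨r', hr', hq, ht⟩
    · simp only [List.foldl_cons, h, ih, List.mem_cons]
      constructor
      · rintro (hs | ⟨r', hr', hq, ht⟩)
        · exact Or.inl hs
        · exact Or.inr ⟨r', Or.inr hr', hq, ht⟩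
      · rintro (hs | ⟨r', hr', hq, ht⟩)
        · exact Or.inl hs
        · rcases hr' with rfl | hr'
          · exact absurd hq (by simp [h])
          · exact Or.inr ⟨r', hr', hq, ht⟩

lemma pvNodupInner (rules : List (List Char × String)) (q : List Char × String → Bool)
    (s : PySem.Set String) (hs : s.Nodup) :
    (rules.foldl (fun s r => if q r then PySem.Set.add s r.2 else s) s).Nodup := by
  induction rules generalizing s with
  | nil => simpa
  | cons r rs ih =>
    by_cases h : q r
    · simp only [List.foldl_cons, h, if_true]; exact ih _ (PySem.Set.nodup_add _ _ hs)
    · simp only [List.foldl_cons, h]; exact ih _ hs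

-- membership in the outer (position) fold
lemma pvMemOuter (lowered : List Char) (is : List Nat) (s : PySem.Set String) (t : String) :
    t ∈ is.foldl
        (fun s i => pvKwTags.foldl
          (fun s r => if PySem.Chars.startswith (lowered.drop i) r.1 then PySem.Set.add s r.2 else s) s) s
      ↔ t ∈ s ∨ ∃ i ∈ is, ∃ r ∈ pvKwTags, PySem.Chars.startswith (lowered.drop i) r.1 = true ∧ t = r.2 := by
  induction is generalizing s with
  | nil => simp
  | cons i js ih =>
    simp only [List.foldl_cons, ih, pvMemInner, List.mem_cons]
    constructor
    · rintro ((hs | ⟨r, hr, hq, ht⟩) | ⟨j, hj, r, hr, hq, ht⟩)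
      · exact Or.inl hs
      · exact Or.inr ⟨i, Or.inl rfl, r, hr, hq, ht⟩
      · exact Or.inr ⟨j, Or.inr hj, r, hr, hq, ht⟩
    · rintro (hs | ⟨j, hj, r, hr, hq, ht⟩)
      · exact Or.inl (Or.inl hs)
      · rcases hj with rfl | hj
        · exact Or.inl (Or.inr ⟨r, hr, hq, ht⟩)
        · exact Or.inr ⟨j, hj, r, hr, hq, ht⟩

lemma pvNodupOuter (lowered : List Char) (is : List Nat) (s : PySem.Set String) (hs : s.Nodup) :
    (is.foldl
        (fun s i => pvKwTags.foldl
          (fun s r => if PySem.Chars.startswith (lowered.drop i) r.1 then PySem.Set.add s r.2 else s) s) s).Nodup := by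
  induction is generalizing s with
  | nil => simpa
  | cons i js ih => exact ih _ (pvNodupInner _ _ _ hs)

lemma pvNodupScan (lowered : List Char) : (pvScan lowered).Nodup :=
  pvNodupOuter lowered _ _ List.nodup_nil

lemma pvExistsRange (lowered kw : List Char) :
    (∃ i ∈ List.range (lowered.length + 1), PySem.Chars.startswith (lowered.drop i) kw = true)
      ↔ PySem.Chars.isIn kw lowered = true := by
  rw [← PySem.Chars.exists_prefix_drop_iff_isIn]
  constructor
  · rintro ⟨i, -, h⟩; exact ⟨i, (PySem.Chars.startswith_iff _ _).mp h⟩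
  · rintro ⟨j, hj⟩
    by_cases hle : j ≤ lowered.length
    · exact ⟨j, List.mem_range.mpr (by omega), (PySem.Chars.startswith_iff _ _).mpr hj⟩
    · have hdrop : lowered.drop j = [] := List.drop_eq_nil_of_le (by omega)
      have hkw : kw = [] := List.prefix_nil.mp (hdrop ▸ hj)
      exact ⟨0, List.mem_range.mpr (by omega), (PySem.Chars.startswith_iff _ _).mpr (by simp [hkw])⟩

lemma pvMemScan (lowered : List Char) (t : String) :
    t ∈ pvScan lowered ↔
      ∃ r ∈ pvKwTags, PySem.Chars.isIn r.1 lowered = true ∧ t = r.2 := by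
  unfold pvScan
  rw [pvMemOuter]
  constructor
  · rintro (h | ⟨i, hi, r, hr, hst, ht⟩)
    · simp [PySem.Set.empty] at h
    · exact ⟨r, hr, (pvExistsRange lowered r.1).mp ⟨i, hi, hst⟩, ht⟩
  · rintro ⟨r, hr, hin, ht⟩
    obtain ⟨i, hi, hst⟩ := (pvExistsRange lowered r.1).mpr hin
    exact Or.inr ⟨i, hi, r, hr, hst, ht⟩

lemma pvM (i : Nat) (h : i < pvKwTags.length) : pvKwTags[i] ∈ pvKwTags :=
  List.getElem_mem h

set_option maxHeartbeats 1000000 in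
-- B's sorted scan equals the alphabetical if-concatenation of the combined conditions
lemma pvScan_sorted (lowered : List Char) :
    PySem.List.sorted (pvScan lowered) (fun x => x) false
      = pvIfTags
          (PySem.Chars.isIn "induction".toList lowered || PySem.Chars.isIn "elim".toList lowered)
          (PySem.Chars.isIn "rewrite".toList lowered)
          (PySem.Chars.isIn "transitivity".toList lowered)
          (PySem.Chars.isIn "contradiction".toList lowered || PySem.Chars.isIn "exfalso".toList lowered)
          (PySem.Chars.isIn "assert ".toList lowered || PySem.Chars.isIn "\nhave ".toList lowered || PySem.Chars.isIn "\nlemma ".toList lowered)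
          (PySem.Chars.isIn "auto".toList lowered || PySem.Chars.isIn "eauto".toList lowered)
          (PySem.Chars.isIn "destruct".toList lowered || PySem.Chars.isIn "case".toList lowered)
          (PySem.Chars.isIn "apply ".toList lowered) := by
  refine PySem.List.sorted_eq_of_perm_of_pairwise_lt _ _ _ ?_ (pvPWIfTags _ _ _ _ _ _ _ _)
  refine (List.perm_ext_iff_of_nodup (pvNodupIfTags _ _ _ _ _ _ _ _) (pvNodupScan lowered)).mpr ?_
  intro t
  rw [pvMemScan, pvMemIfTags]
  constructor
  · rintro (⟨h, rfl⟩|⟨h, rfl⟩|⟨h, rfl⟩|⟨h, rfl⟩|⟨h, rfl⟩|⟨h, rfl⟩|⟨h, rfl⟩|⟨h, rfl⟩)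
    · exact ⟨_, pvM 13 (by decide), h, rfl⟩
    · rcases (Bool.or_eq_true _ _).mp h with h | h
      · exact ⟨_, pvM 9 (by decide), h, rfl⟩
      · exact ⟨_, pvM 10 (by decide), h, rfl⟩
    · rcases (Bool.or_eq_true _ _).mp h with h | h
      · exact ⟨_, pvM 11 (by decide), h, rfl⟩
      · exact ⟨_, pvM 12 (by decide), h, rfl⟩
    · rcases (Bool.or_eq_true _ _).mp h with h | h
      · exact ⟨_, pvM 4 (by decide), h, rfl⟩
      · exact ⟨_, pvM 5 (by decide), h, rfl⟩
    · rcases (Bool.or_eq_true _ _).mp h with h | h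
      · exact ⟨_, pvM 0 (by decide), h, rfl⟩
      · exact ⟨_, pvM 1 (by decide), h, rfl⟩
    · rcases (Bool.or_eq_true _ _).mp h with h | h
      · rcases (Bool.or_eq_true _ _).mp h with h | h
        · exact ⟨_, pvM 6 (by decide), h, rfl⟩
        · exact ⟨_, pvM 7 (by decide), h, rfl⟩
      · exact ⟨_, pvM 8 (by decide), h, rfl⟩
    · exact ⟨_, pvM 2 (by decide), h, rfl⟩
    · exact ⟨_, pvM 3 (by decide), h, rfl⟩
  · rintro ⟨r, hr, hin, ht⟩
    simp only [pvKwTags, List.mem_cons, List.not_mem_nil, or_false] at hr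
    rcases hr with rfl|rfl|rfl|rfl|rfl|rfl|rfl|rfl|rfl|rfl|rfl|rfl|rfl|rfl <;> subst ht <;>
      (simp at hin; simp [hin])

lemma pvTags_eq (text : String) :
    infer_proof_shape_tags_py text
      = pvIfTags
          (PySem.Chars.isIn "induction".toList (PySem.Str.lower text).toList || PySem.Chars.isIn "elim".toList (PySem.Str.lower text).toList)
          (PySem.Chars.isIn "rewrite".toList (PySem.Str.lower text).toList)
          (PySem.Chars.isIn "transitivity".toList (PySem.Str.lower text).toList)
          (PySem.Chars.isIn "contradiction".toList (PySem.Str.lower text).toList || PySem.Chars.isIn "exfalso".toList (PySem.Str.lower text).toList)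
          (PySem.Chars.isIn "assert ".toList (PySem.Str.lower text).toList || PySem.Chars.isIn "\nhave ".toList (PySem.Str.lower text).toList || PySem.Chars.isIn "\nlemma ".toList (PySem.Str.lower text).toList)
          (PySem.Chars.isIn "auto".toList (PySem.Str.lower text).toList || PySem.Chars.isIn "eauto".toList (PySem.Str.lower text).toList)
          (PySem.Chars.isIn "destruct".toList (PySem.Str.lower text).toList || PySem.Chars.isIn "case".toList (PySem.Str.lower text).toList)
          (PySem.Chars.isIn "apply ".toList (PySem.Str.lower text).toList) := by
  refine Eq.trans
    (pvTags_core
      (PySem.Str.isIn "induction" (PySem.Str.lower text) || PySem.Str.isIn "elim" (PySem.Str.lower text))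
      (PySem.Str.isIn "rewrite" (PySem.Str.lower text))
      (PySem.Str.isIn "transitivity" (PySem.Str.lower text))
      (PySem.Str.isIn "contradiction" (PySem.Str.lower text) || PySem.Str.isIn "exfalso" (PySem.Str.lower text))
      (PySem.Str.isIn "assert " (PySem.Str.lower text) || PySem.Str.isIn "\nhave " (PySem.Str.lower text) || PySem.Str.isIn "\nlemma " (PySem.Str.lower text))
      (PySem.Str.isIn "auto" (PySem.Str.lower text) || PySem.Str.isIn "eauto" (PySem.Str.lower text))
      (PySem.Str.isIn "destruct" (PySem.Str.lower text) || PySem.Str.isIn "case" (PySem.Str.lower text))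
      (PySem.Str.isIn "apply " (PySem.Str.lower text))) ?_
  simp only [PySem.Str.isIn_eq]

lemma pvScan_nil_iff (lowered : List Char) :
    pvScan lowered = [] ↔ PySem.List.sorted (pvScan lowered) (fun x => x) false = [] := by
  constructor
  · intro h; rw [h]; rfl
  · intro h
    have hp := PySem.List.sorted_perm (pvScan lowered) (fun x : String => x) false
    have := hp.length_eq
    rw [h] at this
    exact List.eq_nil_of_length_eq_zero this.symm

-- ===== VERDICT =====
theorem oracle_fix_strategy_py_spec : Claim_equal_oracle_fix_strategy_py := by
  intro failed_proof oracle_proof _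
  unfold Spec_oracle_fix_strategy_py oracle_fix_strategy_py oracle_fix_strategy_py_alt
  have hB := pvScan_sorted ((PySem.Str.lower oracle_proof).toList)
  have h0 := pvScan_nil_iff ((PySem.Str.lower oracle_proof).toList)
  rw [hB] at h0
  simp only [pvTags_eq, hB, not_congr h0]
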